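-- pv_equiv track=rewrite | github.com/guome/CTCBeamSearchLM | src/Create_bigramLM.py | initPhonemeBigrams
-- ===== SOURCE A (Python) =====
-- def initPhonemeBigrams(corpus_list, classes):
--     """init of phoneme bigrams. Reads corpus list of phonemes and outputs
-- 	bigram dictionary
--
-- 	Input: corpus_list
-- 		classes
-- 	Output: bigram dictionary
-- 	"""
--
--     bigram = {c: {d: 0 for d in classes} for c in classes}
--     for i in range(0, len(corpus_list)):
--         lenght = len(corpus_list[i]) - 1
--         for j in range(0, lenght):
--             first = corpus_list[i][j]
--             second = corpus_list[i][j + 1]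
--
--             if j == 29:
--                 j = j
--             # ignore unknown chars
--             if first not in bigram or second not in bigram[first]:
--                 continue
--             bigram[first][second] += 1
--     return bigram
-- ===== SOURCE B (Python) =====
-- def initPhonemeBigrams(corpus_list, classes):
--     """Count adjacent-pair occurrences once into a flat tuple-keyed table,
--     then materialize the dense class-by-class matrix in a separate pass."""
--     counts = {}
--     for seq in corpus_list:
--         for pair in zip(seq, seq[1:]):
--             counts[pair] = counts.get(pair, 0) + 1
--     keys = list(dict.fromkeys(classes))
--     return {c: {d: counts.get((c, d), 0) for d in keys} for c in keys}
-- ===== Notes on version B (the rewrite author's own statement) =====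
-- stated objective: alternative
-- what changed: Replaces the dense in-place matrix (init all class pairs to 0, index the corpus with range loops, filter-and-increment) by one unfiltered pass collecting all adjacent pairs into a flat tuple-keyed count table, from which the class-by-class matrix is materialized in a separate double comprehension over deduplicated classes.
import Mathlib
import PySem

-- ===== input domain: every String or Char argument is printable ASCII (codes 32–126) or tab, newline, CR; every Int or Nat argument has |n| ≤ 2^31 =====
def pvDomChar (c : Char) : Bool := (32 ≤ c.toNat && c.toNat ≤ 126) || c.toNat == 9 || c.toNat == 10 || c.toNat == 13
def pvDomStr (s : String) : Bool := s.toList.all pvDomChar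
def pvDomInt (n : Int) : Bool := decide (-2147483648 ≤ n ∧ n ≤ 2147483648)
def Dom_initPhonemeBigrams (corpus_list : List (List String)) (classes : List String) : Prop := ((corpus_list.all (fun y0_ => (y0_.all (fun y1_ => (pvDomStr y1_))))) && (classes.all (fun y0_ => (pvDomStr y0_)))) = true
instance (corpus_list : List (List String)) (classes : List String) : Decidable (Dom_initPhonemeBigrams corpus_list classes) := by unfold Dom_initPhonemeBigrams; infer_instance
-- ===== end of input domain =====

-- B replaces A's dense init-then-filter-and-increment matrix by one unfiltered flat
-- pair-count pass plus a separate materialization over deduplicated classes (alternative).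

-- ===== PORT A =====
def initPhonemeBigrams (corpus_list : List (List String)) (classes : List String) : List (String × List (String × Int)) :=
  -- bigram = {c: {d: 0 for d in classes} for c in classes}
  let bigram0 : PySem.Dict String (PySem.Dict String Int) :=
    classes.foldl (fun B c =>
      B.insert c (classes.foldl (fun d x => d.insert x (0 : Int)) PySem.Dict.empty))
      PySem.Dict.empty
  -- for i in range(0, len(corpus_list)): … for j in range(0, lenght): …
  let bigram :=
    (PySem.List.pyRange 0 (corpus_list.length : Int) 1).foldl (fun B i =>
      let row := PySem.List.pyGetD corpus_list i []
      let lenght : Int := (row.length : Int) - 1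
      (PySem.List.pyRange 0 lenght 1).foldl (fun B j =>
        -- 'if j == 29: j = j' in the source is a no-op and has no effect
        -- if first not in bigram or second not in bigram[first]: continue / bigram[first][second] += 1
        if B.contains (PySem.List.pyGetD row j "") &&
            (B.getD (PySem.List.pyGetD row j "") PySem.Dict.empty).contains (PySem.List.pyGetD row (j + 1) "") then
          B.modify (PySem.List.pyGetD row j "") PySem.Dict.empty
            (fun inner => inner.modify (PySem.List.pyGetD row (j + 1) "") 0 (· + 1))
        else B) B) bigram0
  bigram.items.map (fun p => (p.1, p.2.items))

-- ===== PORT B =====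
def initPhonemeBigrams_alt (corpus_list : List (List String)) (classes : List String) : List (String × List (String × Int)) :=
  -- counts[pair] = counts.get(pair, 0) + 1 over all adjacent pairs of every seq
  let counts : PySem.Dict (String × String) Int :=
    corpus_list.foldl (fun d seq =>
      ((seq.zip (PySem.List.slice seq (some 1) none)).foldl
        (fun d pair => d.insert pair (d.getD pair 0 + 1)) d)) PySem.Dict.empty
  -- keys = list(dict.fromkeys(classes))
  let keys := PySem.List.dedup classes
  -- {c: {d: counts.get((c, d), 0) for d in keys} for c in keys}
  keys.map (fun c => (c, keys.map (fun d2 => (d2, counts.getD (c, d2) 0))))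

-- ===== PRECONDITION & SPEC =====
def Spec_initPhonemeBigrams (corpus_list : List (List String)) (classes : List String) (out : List (String × List (String × Int))) : Prop := out = initPhonemeBigrams_alt corpus_list classes
instance (corpus_list : List (List String)) (classes : List String) (out : List (String × List (String × Int))) : Decidable (Spec_initPhonemeBigrams corpus_list classes out) := by unfold Spec_initPhonemeBigrams; infer_instance

-- ===== CLAIM (what is proved, stated in full; the proofs are below) =====
def Claim_equal_initPhonemeBigrams : Prop := ∀ (corpus_list : List (List String)) (classes : List String), Dom_initPhonemeBigrams corpus_list classes → Spec_initPhonemeBigrams corpus_list classes (initPhonemeBigrams corpus_list classes)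

-- ===== LEMMAS AND PROOFS =====

-- A's guarded increment step, as a function of one adjacent pair
def stepA (B : PySem.Dict String (PySem.Dict String Int)) (p : String × String) : PySem.Dict String (PySem.Dict String Int) :=
  if B.contains p.1 && (B.getD p.1 PySem.Dict.empty).contains p.2 then
    B.modify p.1 PySem.Dict.empty (fun inner => inner.modify p.2 0 (· + 1))
  else B

-- all adjacent pairs of the corpus, in traversal order
def allPairs (corpus_list : List (List String)) : List (String × String) :=
  corpus_list.flatMap (fun seq => seq.zip seq.tail)

theorem zip_tail_map_range (row : List String) :
    (List.range (row.length - 1)).map (fun k => (row.getD k "", row.getD (k + 1) "")) = row.zip row.tail := by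
  apply List.ext_getElem
  · simp [List.length_zip]
  · intro i h1 h2
    simp only [List.getElem_map, List.getElem_range, List.getElem_zip, List.getElem_tail]
    have hl : i < row.length - 1 := by simpa using h1
    rw [List.getD_eq_getElem _ _ (by omega), List.getD_eq_getElem _ _ (by omega)]

theorem inner_loop_eq (row : List String) (B : PySem.Dict String (PySem.Dict String Int)) :
    (PySem.List.pyRange 0 ((row.length : Int) - 1) 1).foldl (fun B j =>
        if B.contains (PySem.List.pyGetD row j "") &&
            (B.getD (PySem.List.pyGetD row j "") PySem.Dict.empty).contains (PySem.List.pyGetD row (j + 1) "") then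
          B.modify (PySem.List.pyGetD row j "") PySem.Dict.empty
            (fun inner => inner.modify (PySem.List.pyGetD row (j + 1) "") 0 (· + 1))
        else B) B
      = (row.zip row.tail).foldl stepA B := by
  rw [PySem.List.pyRange_one, List.foldl_map, ← zip_tail_map_range row, List.foldl_map]
  have hn : ((row.length : Int) - 1 - 0).toNat = row.length - 1 := by omega
  rw [hn]
  have hf : ∀ (B : PySem.Dict String (PySem.Dict String Int)) (k : Nat),
      PySem.List.pyGetD row (0 + (k : Int)) "" = row.getD k "" ∧
      PySem.List.pyGetD row (0 + (k : Int) + 1) "" = row.getD (k + 1) "" := by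
    intro B k
    constructor
    · rw [zero_add, PySem.List.pyGetD_natCast]
    · rw [zero_add, show ((k : Int) + 1) = ((k + 1 : Nat) : Int) by push_cast; ring,
        PySem.List.pyGetD_natCast]
  apply List.foldl_ext
  intro B k _
  obtain ⟨h1, h2⟩ := hf B k
  simp only [h1, h2, stepA]

theorem foldl_flatMap {α β σ : Type} (g : α → List β) (f : σ → β → σ) :
    ∀ (l : List α) (s : σ), (l.flatMap g).foldl f s = l.foldl (fun s a => (g a).foldl f s) s := by
  intro l
  induction l with
  | nil => intro s; rfl
  | cons a t ih => intro s; simp [List.flatMap_cons, List.foldl_append, ih]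

theorem getD_foldl_insert_const {κ ν : Type} [BEq κ] [LawfulBEq κ] [DecidableEq κ]
    (v e : ν) : ∀ (l : List κ) (B : PySem.Dict κ ν) (c : κ),
    (l.foldl (fun B x => B.insert x v) B).getD c e = if c ∈ l then v else B.getD c e := by
  intro l
  induction l with
  | nil => intro B c; simp
  | cons a t ih =>
    intro B c
    simp only [List.foldl_cons, ih, PySem.Dict.getD_insert, List.mem_cons]
    by_cases h1 : c ∈ t <;> by_cases h2 : c = a <;> simp [h1, h2]

theorem keys_insert_eq_of_mem {κ ν : Type} [BEq κ] [LawfulBEq κ]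
    (d : PySem.Dict κ ν) (k : κ) (v : ν) (h : k ∈ d.keys) : (d.insert k v).keys = d.keys :=
  PySem.Dict.keys_insert_of_contains d v ((PySem.Dict.contains_iff_mem_keys d k).2 h)

theorem foldA_run (K : List String) :
    ∀ (P : List (String × String)) (B : PySem.Dict String (PySem.Dict String Int)),
    B.keys = K → (∀ c ∈ K, (B.getD c PySem.Dict.empty).keys = K) →
    (P.foldl stepA B).keys = K ∧
    (∀ c ∈ K, ((P.foldl stepA B).getD c PySem.Dict.empty).keys = K) ∧
    (∀ c d, ((P.foldl stepA B).getD c PySem.Dict.empty).getD d 0 =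
      (B.getD c PySem.Dict.empty).getD d 0 + if c ∈ K ∧ d ∈ K then (P.count (c, d) : Int) else 0) := by
  intro P
  induction P with
  | nil =>
    intro B hk hin
    refine ⟨hk, hin, fun c d => by simp⟩
  | cons p P ih =>
    intro B hk hin
    have hc1 : B.contains p.1 = decide (p.1 ∈ K) := by
      rw [PySem.Dict.contains_eq_decide_mem_keys, hk]
    by_cases hp1 : p.1 ∈ K
    · have hinner : (B.getD p.1 PySem.Dict.empty).keys = K := hin p.1 hp1
      have hc2 : (B.getD p.1 PySem.Dict.empty).contains p.2 = decide (p.2 ∈ K) := by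
        rw [PySem.Dict.contains_eq_decide_mem_keys, hinner]
      by_cases hp2 : p.2 ∈ K
      · -- increment branch
        have hstep : stepA B p = B.modify p.1 PySem.Dict.empty (fun inner => inner.modify p.2 0 (· + 1)) := by
          simp [stepA, hc1, hc2, hp1, hp2]
        set B' := B.modify p.1 PySem.Dict.empty (fun inner => inner.modify p.2 0 (· + 1)) with hB'
        have hk' : B'.keys = K := by
          rw [hB', PySem.Dict.keys_modify, keys_insert_eq_of_mem _ _ _ (hk ▸ hp1), hk]
        have hget' : ∀ c, B'.getD c PySem.Dict.empty =
            if c = p.1 then (B.getD p.1 PySem.Dict.empty).modify p.2 0 (· + 1)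
            else B.getD c PySem.Dict.empty := by
          intro c; rw [hB', PySem.Dict.getD_modify]
        have hin' : ∀ c ∈ K, (B'.getD c PySem.Dict.empty).keys = K := by
          intro c hc
          rw [hget']
          by_cases hcc : c = p.1
          · rw [if_pos hcc, PySem.Dict.keys_modify,
              keys_insert_eq_of_mem _ _ _ (hinner ▸ hp2), hinner]
          · rw [if_neg hcc]; exact hin c hc
        have hval : ∀ c d, (B'.getD c PySem.Dict.empty).getD d 0 =
            (B.getD c PySem.Dict.empty).getD d 0 + if p = (c, d) then 1 else 0 := by
          intro c d
          rw [hget']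
          by_cases hcc : c = p.1
          · subst hcc
            rw [if_pos rfl, PySem.Dict.getD_modify]
            by_cases hdd : d = p.2
            · subst hdd; simp
            · have hne : p ≠ (p.1, d) := by intro h; apply hdd; rw [h]
              rw [if_neg hdd, if_neg hne, add_zero]
          · have hne : p ≠ (c, d) := by intro h; apply hcc; rw [h]
            rw [if_neg hcc, if_neg hne, add_zero]
        obtain ⟨g1, g2, g3⟩ := ih B' hk' hin'
        refine ⟨by simpa [hstep] using g1, by simpa [hstep] using g2, ?_⟩
        intro c d
        simp only [List.foldl_cons, hstep]
        rw [g3 c d, hval c d]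
        have hcount : ((p :: P).count (c, d) : Int) = (P.count (c, d) : Int) + (if p = (c, d) then 1 else 0) := by
          rw [List.count_cons]; push_cast; simp [beq_iff_eq]
        by_cases hK : c ∈ K ∧ d ∈ K
        · rw [if_pos hK, if_pos hK, hcount]; ring
        · have hne : p ≠ (c, d) := by
            intro h; subst h; exact hK ⟨hp1, hp2⟩
          rw [if_neg hK, if_neg hK, if_neg hne]; ring
      · have hstep : stepA B p = B := by simp [stepA, hc1, hc2, hp2]
        obtain ⟨g1, g2, g3⟩ := ih B hk hin
        refine ⟨by simpa [hstep] using g1, by simpa [hstep] using g2, ?_⟩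
        intro c d
        simp only [List.foldl_cons, hstep]
        rw [g3 c d]
        by_cases hK : c ∈ K ∧ d ∈ K
        · have hne : ¬(p == (c, d)) = true := by
            simp only [beq_iff_eq]; intro h; apply hp2; rw [h]; exact hK.2
          rw [if_pos hK, if_pos hK, List.count_cons, if_neg hne, Nat.add_zero]
        · rw [if_neg hK, if_neg hK]
    · have hstep : stepA B p = B := by simp [stepA, hc1, hp1]
      obtain ⟨g1, g2, g3⟩ := ih B hk hin
      refine ⟨by simpa [hstep] using g1, by simpa [hstep] using g2, ?_⟩
      intro c d
      simp only [List.foldl_cons, hstep]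
      rw [g3 c d]
      by_cases hK : c ∈ K ∧ d ∈ K
      · have hne : ¬(p == (c, d)) = true := by
          simp only [beq_iff_eq]; intro h; apply hp1; rw [h]; exact hK.1
        rw [if_pos hK, if_pos hK, List.count_cons, if_neg hne, Nat.add_zero]
      · rw [if_neg hK, if_neg hK]

theorem counts_getD (corpus_list : List (List String)) (p : String × String) :
    (corpus_list.foldl (fun d seq =>
        ((seq.zip (PySem.List.slice seq (some 1) none)).foldl
          (fun d pair => d.insert pair (d.getD pair 0 + 1)) d)) PySem.Dict.empty).getD p 0
      = ((allPairs corpus_list).count p : Int) := by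
  simp only [PySem.List.slice_from_one]
  rw [← foldl_flatMap (fun seq => seq.zip seq.tail)
      (fun d pair => PySem.Dict.insert d pair (d.getD pair 0 + 1)) corpus_list PySem.Dict.empty]
  rw [PySem.Dict.getD_foldl_insert_add_one, PySem.Dict.getD_empty, allPairs]
  ring

-- ===== VERDICT (by name: the statement is the Claim_ definition above) =====
theorem initPhonemeBigrams_spec : Claim_equal_initPhonemeBigrams := by
  intro corpus classes _
  unfold Spec_initPhonemeBigrams
  simp only [initPhonemeBigrams, initPhonemeBigrams_alt]
  set K := PySem.List.dedup classes with hKdef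
  set inner0 : PySem.Dict String Int :=
    classes.foldl (fun d x => d.insert x (0 : Int)) PySem.Dict.empty with hinner0
  set bigram0 : PySem.Dict String (PySem.Dict String Int) :=
    classes.foldl (fun B c => B.insert c inner0) PySem.Dict.empty with hbigram0
  -- initial-state facts
  have hKof : K = PySem.Set.ofList classes := by rw [hKdef, PySem.List.dedup_eq_ofList]
  have h0keys : bigram0.keys = K := by
    rw [hbigram0, PySem.Dict.keys_foldl_insert classes (fun _ _ => inner0),
      PySem.Dict.keys_empty, PySem.Set.update_nil_left, hKof]
  have hinkeys : inner0.keys = K := by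
    rw [hinner0, PySem.Dict.keys_foldl_insert classes (fun _ _ => (0 : Int)),
      PySem.Dict.keys_empty, PySem.Set.update_nil_left, hKof]
  have h0getD : ∀ c, bigram0.getD c PySem.Dict.empty =
      if c ∈ classes then inner0 else PySem.Dict.empty := by
    intro c
    rw [hbigram0, getD_foldl_insert_const inner0 PySem.Dict.empty classes, PySem.Dict.getD_empty]
  have h0in : ∀ c ∈ K, (bigram0.getD c PySem.Dict.empty).keys = K := by
    intro c hc
    have : c ∈ classes := by rw [hKof] at hc; exact (PySem.Set.mem_ofList classes c).1 hc
    rw [h0getD, if_pos this, hinkeys]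
  have h0val : ∀ c d, (bigram0.getD c PySem.Dict.empty).getD d 0 = 0 := by
    intro c d
    rw [h0getD]
    by_cases hc : c ∈ classes
    · rw [if_pos hc, hinner0, getD_foldl_insert_const (0 : Int) 0 classes, PySem.Dict.getD_empty]
      split_ifs <;> rfl
    · rw [if_neg hc, PySem.Dict.getD_empty]
  -- turn A's index loops into a fold of stepA over allPairs
  have houter : (fun (B : PySem.Dict String (PySem.Dict String Int)) (i : Int) =>
        (PySem.List.pyRange 0 (((PySem.List.pyGetD corpus i []).length : Int) - 1) 1).foldl (fun B j =>
          if B.contains (PySem.List.pyGetD (PySem.List.pyGetD corpus i []) j "") &&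
              (B.getD (PySem.List.pyGetD (PySem.List.pyGetD corpus i []) j "") PySem.Dict.empty).contains
                (PySem.List.pyGetD (PySem.List.pyGetD corpus i []) (j + 1) "") then
            B.modify (PySem.List.pyGetD (PySem.List.pyGetD corpus i []) j "") PySem.Dict.empty
              (fun inner => inner.modify (PySem.List.pyGetD (PySem.List.pyGetD corpus i []) (j + 1) "") 0 (· + 1))
          else B) B)
      = (fun B i => ((PySem.List.pyGetD corpus i []).zip (PySem.List.pyGetD corpus i []).tail).foldl stepA B) := by
    funext B i
    exact inner_loop_eq (PySem.List.pyGetD corpus i []) B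
  rw [houter,
    PySem.List.foldl_pyRange_zero_pyGetD' corpus ([] : List String)
      (fun B row => (row.zip row.tail).foldl stepA B) bigram0,
    ← foldl_flatMap (fun seq => seq.zip seq.tail) stepA corpus bigram0, ← allPairs]
  -- run the invariant
  obtain ⟨hk, hin, hv⟩ := foldA_run K (allPairs corpus) bigram0 h0keys h0in
  set F := (allPairs corpus).foldl stepA bigram0 with hF
  have hnodupK : K.Nodup := by rw [hKof]; exact PySem.Set.nodup_ofList classes
  have hnodup : F.keys.Nodup := by rw [hk]; exact hnodupK
  rw [PySem.Dict.items_eq_map_keys F hnodup PySem.Dict.empty, hk, List.map_map]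
  apply List.map_congr_left
  intro c hc
  simp only [Function.comp_apply]
  refine congrArg (Prod.mk c) ?_
  have hinqc : (F.getD c PySem.Dict.empty).keys = K := hin c hc
  rw [PySem.Dict.items_eq_map_keys (F.getD c PySem.Dict.empty) (by rw [hinqc]; exact hnodupK) 0, hinqc]
  apply List.map_congr_left
  intro d hd
  refine congrArg (Prod.mk d) ?_
  rw [hv c d, h0val c d, if_pos ⟨hc, hd⟩, counts_getD corpus (c, d), zero_add]
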